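-- pv_equiv track=rewrite | github.com/mazadegan/snc2fst | src/snc2fst/alphabet.py | _all_parses
-- ===== SOURCE A (Python) =====
-- def _all_parses(s: str, names: frozenset[str]) -> list[list[str]]:
--     """Return every way to split s into a sequence of names."""
--     if not s:
--         return [[]]
--     return [
--         [name] + rest
--         for name in names
--         if s.startswith(name)
--         for rest in _all_parses(s[len(name):], names)
--     ]
-- ===== SOURCE B (Python) =====
-- def _all_parses(s: str, names) -> list[list[str]]:
--     """Return every way to split s into a sequence of names.
--
--     Bottom-up DP over positions: table[i] holds all parses of s[i:],
--     filled from the end, so each suffix's parse list is computed once.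
--     """
--     n = len(s)
--     table = [None] * n + [[[]]]
--     for i in range(n - 1, -1, -1):
--         table[i] = [
--             [name] + rest
--             for name in names
--             if s.startswith(name, i)
--             for rest in table[i + len(name)]
--         ]
--     return table[0]
-- ===== Notes on version B (the rewrite author's own statement) =====
-- stated objective: alternative
-- what changed: Replaced A's top-down recursion (which re-parses a suffix once per path reaching it) by a bottom-up DP table indexed by position, computing each suffix's parse list exactly once; intended as faster on inputs with few parses but many partial matches, not confirmed (1.28x at the largest size both finished).
import Mathlib
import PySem

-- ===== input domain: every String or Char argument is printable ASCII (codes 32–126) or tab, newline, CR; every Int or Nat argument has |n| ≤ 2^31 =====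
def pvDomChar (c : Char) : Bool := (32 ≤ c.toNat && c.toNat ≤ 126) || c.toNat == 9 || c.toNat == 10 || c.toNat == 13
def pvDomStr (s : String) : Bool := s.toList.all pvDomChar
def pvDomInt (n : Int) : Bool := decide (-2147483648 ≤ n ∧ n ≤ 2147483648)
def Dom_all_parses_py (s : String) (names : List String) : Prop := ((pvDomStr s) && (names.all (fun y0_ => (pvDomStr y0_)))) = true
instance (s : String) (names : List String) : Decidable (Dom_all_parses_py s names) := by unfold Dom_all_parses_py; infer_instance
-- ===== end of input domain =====

-- B replaces A's top-down recursion by a bottom-up table over suffix positions,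
-- computing each suffix's parse list once (objective: alternative).

-- ===== PORT A =====
-- A recurses on ever-shorter suffixes; fuel |s|+1 suffices because under
-- Pre_ every name is non-empty, so each recursive call strictly shortens s.
def aParses (names : List String) : Nat → List Char → List (List String)
  | 0, _ => []
  | fuel + 1, s =>
    if s = [] then [[]]
    else
      names.flatMap (fun name =>
        if PySem.Chars.startswith s name.toList then
          (aParses names fuel (PySem.List.slice s (some (name.toList.length : Int)) none)).map
            (fun rest => name :: rest)
        else [])

def all_parses_py (s : String) (names : List String) : List (List String) :=
  aParses names (s.toList.length + 1) s.toList

-- ===== PORT B =====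
-- table row for position i; `tab` holds the rows for positions i+1 … n
-- (head = position i+1), so Python's table[i + len(name)] is tab[len(name) - 1].
def bRow (names : List String) (cs : List Char) (i : Nat)
    (tab : List (List (List String))) : List (List String) :=
  names.flatMap (fun name =>
    if PySem.Chars.startswith (cs.drop i) name.toList then
      (tab.getD (name.toList.length - 1) []).map (fun rest => name :: rest)
    else [])

def all_parses_py_alt (s : String) (names : List String) : List (List String) :=
  let cs := s.toList
  let n := cs.length
  let tab := (List.range n).foldl (fun tab k => bRow names cs (n - 1 - k) tab :: tab) [[[]]]
  tab.headD []

-- ===== PRECONDITION & SPEC =====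
-- Pre_ excludes names containing "" with a non-empty s: there A recurses forever
-- (RecursionError) and B hits an unfilled table slot (TypeError); neither returns.
def Pre_all_parses_py (s : String) (names : List String) : Prop :=
  s = "" ∨ "" ∉ names
instance (s : String) (names : List String) : Decidable (Pre_all_parses_py s names) := by
  unfold Pre_all_parses_py; infer_instance

def pvWitness_all_parses_py : String × List String := ("aab", ["a", "ab", "b", "aa"])

def Spec_all_parses_py (s : String) (names : List String) (out : List (List String)) : Prop := out = all_parses_py_alt s names
instance (s : String) (names : List String) (out : List (List String)) : Decidable (Spec_all_parses_py s names out) := by unfold Spec_all_parses_py; infer_instance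

-- ===== CLAIM (what is proved, stated in full; the proofs are below) =====
def Claim_equal_all_parses_py : Prop := ∀ (s : String) (names : List String), Dom_all_parses_py s names → Pre_all_parses_py s names → Spec_all_parses_py s names (all_parses_py s names)

-- ===== LEMMAS AND PROOFS =====

theorem flatMap_congr_mem {α β : Type} {l : List α} {f g : α → List β}
    (h : ∀ a ∈ l, f a = g a) : l.flatMap f = l.flatMap g := by
  simp only [List.flatMap_def]
  exact congrArg List.flatten (List.map_congr_left h)

theorem aParses_succ (names : List String) (fuel : Nat) (s : List Char) :
    aParses names (fuel + 1) s =
      if s = [] then [[]]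
      else
        names.flatMap (fun name =>
          if PySem.Chars.startswith s name.toList then
            (aParses names fuel (PySem.List.slice s (some (name.toList.length : Int)) none)).map
              (fun rest => name :: rest)
          else []) := rfl

theorem name_len {names : List String} (h : "" ∉ names) {name : String}
    (hn : name ∈ names) : 1 ≤ name.toList.length := by
  rcases Nat.eq_zero_or_pos name.toList.length with h0 | h0
  · exfalso
    apply h
    have hnil : name.toList = [] := List.eq_nil_of_length_eq_zero h0
    have : name = "" := String.toList_inj.mp (by simp [hnil])
    simpa [this] using hn
  · exact h0

-- with non-empty names, the result does not depend on the fuel once it exceeds |s|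
theorem aParses_fuel (names : List String) (h : "" ∉ names) :
    ∀ (f₁ f₂ : Nat) (l : List Char), l.length < f₁ → l.length < f₂ →
      aParses names f₁ l = aParses names f₂ l := by
  intro f₁
  induction f₁ with
  | zero => intro f₂ l h1 _; omega
  | succ f₁ ih =>
    intro f₂ l h1 h2
    match f₂ with
    | 0 => omega
    | f₂ + 1 =>
      rw [aParses_succ, aParses_succ]
      by_cases hl : l = []
      · simp [hl]
      · simp only [if_neg hl]
        refine flatMap_congr_mem ?_
        intro name hname
        by_cases hsw : PySem.Chars.startswith l name.toList = true
        · simp only [if_pos hsw]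
          have hpref : name.toList <+: l := (PySem.Chars.startswith_iff _ _).mp hsw
          have hmle : name.toList.length ≤ l.length := hpref.length_le
          have hm1 : 1 ≤ name.toList.length := name_len h hname
          rw [PySem.List.slice_from_natCast]
          have hlen : (l.drop name.toList.length).length = l.length - name.toList.length := by
            simp
          have hl0 : 1 ≤ l.length := by
            cases l with
            | nil => exact absurd rfl hl
            | cons a t => simp
          congr 1
          exact ih f₂ (l.drop name.toList.length) (by omega) (by omega)
        · simp [hsw]

-- canonical parse list of a suffix
def canonP (names : List String) (l : List Char) : List (List String) :=
  aParses names (l.length + 1) l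

theorem bRow_eq (names : List String) (h : "" ∉ names) (cs : List Char) (i k : Nat)
    (hik : i + k + 1 = cs.length)
    (tab : List (List (List String)))
    (htab : tab = (List.range (k + 1)).map (fun j => canonP names (cs.drop (i + 1 + j)))) :
    bRow names cs i tab = canonP names (cs.drop i) := by
  have hdlen : (cs.drop i).length = k + 1 := by simp; omega
  have hne : cs.drop i ≠ [] := by
    intro hnil; rw [hnil] at hdlen; simp at hdlen
  unfold bRow canonP
  rw [hdlen, aParses_succ, if_neg hne]
  refine flatMap_congr_mem ?_
  intro name hname
  by_cases hsw : PySem.Chars.startswith (cs.drop i) name.toList = true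
  · simp only [if_pos hsw]
    have hpref : name.toList <+: cs.drop i := (PySem.Chars.startswith_iff _ _).mp hsw
    have hmle : name.toList.length ≤ k + 1 := by
      have := hpref.length_le; omega
    have hm1 : 1 ≤ name.toList.length := name_len h hname
    set m := name.toList.length with hm
    have hget : tab.getD (m - 1) [] = canonP names (cs.drop (i + m)) := by
      rw [htab]
      have hlt : m - 1 < k + 1 := by omega
      rw [List.getD_eq_getElem?_getD, List.getElem?_map, List.getElem?_range hlt]
      simp only [Option.map_some, Option.getD_some]
      congr 2
      omega
    rw [hget]
    congr 1
    rw [PySem.List.slice_from_natCast, List.drop_drop]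
    unfold canonP
    have hlen2 : (cs.drop (i + m)).length = k + 1 - m := by simp; omega
    exact aParses_fuel names h _ _ _ (by omega) (by omega)
  · simp [hsw]

theorem foldl_inv (names : List String) (h : "" ∉ names) (cs : List Char) :
    ∀ k, k ≤ cs.length →
      (List.range k).foldl (fun tab j => bRow names cs (cs.length - 1 - j) tab :: tab) [[[]]]
        = (List.range (k + 1)).map (fun j => canonP names (cs.drop (cs.length - k + j))) := by
  intro k
  induction k with
  | zero =>
    intro _
    simp [canonP, aParses]
  | succ k ih =>
    intro hk
    rw [List.range_succ, List.foldl_append, ih (by omega)]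
    simp only [List.foldl_cons, List.foldl_nil]
    have hrow : bRow names cs (cs.length - 1 - k)
        ((List.range (k + 1)).map (fun j => canonP names (cs.drop (cs.length - k + j))))
        = canonP names (cs.drop (cs.length - 1 - k)) := by
      refine bRow_eq names h cs (cs.length - 1 - k) k (by omega) _ ?_
      refine List.map_congr_left ?_
      intro j hj
      have : cs.length - k + j = cs.length - 1 - k + 1 + j := by omega
      rw [this]
    rw [hrow]
    have hr : (List.range (k + 1 + 1)).map
        (fun j => canonP names (cs.drop (cs.length - (k + 1) + j)))
        = canonP names (cs.drop (cs.length - (k + 1) + 0)) ::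
          (List.range (k + 1)).map
            (fun j => canonP names (cs.drop (cs.length - (k + 1) + (j + 1)))) := by
      rw [List.range_succ_eq_map]
      simp [List.map_map, Function.comp]
    rw [hr]
    congr 1
    · have : cs.length - 1 - k = cs.length - (k + 1) + 0 := by omega
      rw [this]
    · refine List.map_congr_left ?_
      intro j hj
      have : cs.length - k + j = cs.length - (k + 1) + (j + 1) := by omega
      rw [this]

-- ===== VERDICT (by name: the statement is the Claim_ definition above) =====
theorem all_parses_py_spec : Claim_equal_all_parses_py := by
  intro s names _ hpre
  unfold Spec_all_parses_py all_parses_py all_parses_py_alt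
  rcases hpre with hs | hn
  · subst hs
    simp [aParses]
  · simp only
    rw [foldl_inv names hn s.toList s.toList.length (le_refl _)]
    rw [List.range_succ_eq_map]
    simp only [List.map_cons, List.headD_cons]
    unfold canonP
    simp
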